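-- pv_equiv track=rewrite | github.com/joshmthurman-cloud/Development | TPN_Finder_1000/check_tpns.py | generate_sequential_tpns
-- ===== SOURCE A (Python) =====
-- import string
--
-- def generate_sequential_tpns(length, start_tpn=None, count=None):
--     """
--     Generate TPNs sequentially in alphanumeric order.
--
--     Args:
--         length: Length of TPN (10-12)
--         start_tpn: Starting TPN (optional, defaults to all zeros)
--         count: Number of TPNs to generate (optional, can run indefinitely)
--     """
--     chars = string.ascii_uppercase + string.digits  # A-Z, 0-9
--
--     if start_tpn:
--         # Start from the given TPN
--         current = list(start_tpn.upper())
--         # Validate all characters are in our charset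
--         if not all(c in chars for c in current):
--             raise ValueError(f"Start TPN contains invalid characters. Use only A-Z and 0-9")
--     else:
--         # Start from all zeros
--         current = ['0'] * length
--
--     generated = 0
--
--     while True:
--         if count and generated >= count:
--             break
--
--         yield ''.join(current)
--         generated += 1
--
--         # Increment to next TPN (like counting: 0000 -> 0001 -> ... -> 0009 -> 000A -> ... -> 000Z -> 0010)
--         i = length - 1
--         while i >= 0:
--             try:
--                 char_idx = chars.index(current[i])
--             except ValueError:
--                 # Invalid character, reset to '0'
--                 current[i] = '0'
--                 char_idx = 0
--
--             if char_idx < len(chars) - 1: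
--                 current[i] = chars[char_idx + 1]
--                 break
--             else:
--                 current[i] = chars[0]
--                 i -= 1
--         else:
--             # Reached the end (all Z's)
--             break
-- ===== SOURCE B (Python) =====
-- import string
--
-- def generate_sequential_tpns(length, start_tpn=None, count=None):
--     """
--     Generate TPNs sequentially in alphanumeric order, driving the sequence
--     with a single base-36 integer counter that is re-encoded for each TPN.
--     """
--     chars = string.ascii_uppercase + string.digits  # A-Z, 0-9
--
--     if start_tpn:
--         s = start_tpn.upper()
--         if not all(c in chars for c in s):
--             raise ValueError(f"Start TPN contains invalid characters. Use only A-Z and 0-9")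
--     else:
--         s = '0' * length
--
--     width = len(s)
--     n = 0
--     for c in s:
--         n = n * 36 + chars.index(c)
--     max_val = 36 ** width - 1
--
--     generated = 0
--     while True:
--         if count and generated >= count:
--             break
--
--         m, digits = n, []
--         for _ in range(width):
--             m, r = divmod(m, 36)
--             digits.append(chars[r])
--         yield ''.join(reversed(digits))
--         generated += 1
--
--         if n >= max_val:
--             break
--         n += 1
-- ===== Notes on version B (the rewrite author's own statement) =====
-- stated objective: alternative
-- what changed: B replaces A's carry-propagating digit-list increment by a single base-36 integer counter (decode the start TPN once, re-encode and increment n each step, stop at 36**len-1 or after count TPNs); Pre_ excludes start TPNs whose length differs from `length` -- an inconsistent argument pair on which A raises IndexError when shorter and, when longer, increments only indices 0..length-1 while dragging the remaining characters along as a frozen accidental suffix, whereas B counts over the whole start string.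
-- outside the precondition, e.g. on generate_sequential_tpns(3, 'AB', 2): A raises IndexError, B returns ['AB', 'AC']; on generate_sequential_tpns(1, 'AB', 2): A returns ['AB', 'BB'], B returns ['AB', 'AC']; on generate_sequential_tpns(-2, 'AB', 3): A returns ['AB'], B returns ['AB', 'AC', 'AD']
import Mathlib
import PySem

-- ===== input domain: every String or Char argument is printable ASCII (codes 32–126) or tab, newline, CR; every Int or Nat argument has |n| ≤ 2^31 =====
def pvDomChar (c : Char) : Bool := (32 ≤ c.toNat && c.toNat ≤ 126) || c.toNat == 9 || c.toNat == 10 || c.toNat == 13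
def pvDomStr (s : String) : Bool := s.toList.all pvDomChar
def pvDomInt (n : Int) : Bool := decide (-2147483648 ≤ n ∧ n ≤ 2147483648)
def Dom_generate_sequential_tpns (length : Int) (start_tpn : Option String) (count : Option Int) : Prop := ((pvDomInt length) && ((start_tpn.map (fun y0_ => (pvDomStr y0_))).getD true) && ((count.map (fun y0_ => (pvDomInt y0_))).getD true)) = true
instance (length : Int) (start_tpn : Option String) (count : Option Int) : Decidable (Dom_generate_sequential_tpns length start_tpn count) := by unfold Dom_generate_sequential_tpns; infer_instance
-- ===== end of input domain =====

-- B replaces A's carry-propagating digit-list counter by a single base-36 integer counter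
-- that is re-encoded for each TPN (alternative decomposition, same cost class).


-- ===== PORT A =====

-- string.ascii_uppercase + string.digits
def tpnChars : List Char :=
  ['A','B','C','D','E','F','G','H','I','J','K','L','M','N','O','P','Q','R','S','T',
   'U','V','W','X','Y','Z','0','1','2','3','4','5','6','7','8','9']

-- the inner `while i >= 0` increment loop; argument j is Python's i+1 (j = 0 is the
-- loop's `else: break`); returns (current, overflowed?)
def tpnIncAux : List Char → Nat → List Char × Bool
  | cur, 0 => (cur, true)
  | cur, j+1 =>
    match PySem.List.pyGet? cur ((j : Nat) : Int) with
    | none => (cur, true)   -- Python raises IndexError on current[i] here; excluded by Pre_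
    | some ci =>
      match PySem.List.index? tpnChars ci with
      | some k =>
        if k < 35 then (cur.set j (tpnChars.getD (k+1) 'A'), false)   -- chars[k+1]; k+1 ≤ 35 is in range
        else tpnIncAux (cur.set j 'A') j                               -- current[i] = chars[0]; i -= 1
      | none => ((cur.set j '0').set j (tpnChars.getD 1 'A'), false)   -- except ValueError: '0', idx 0; then 0 < 35

-- fuel for the outer `while True`; always at least the number of iterations the Python
-- loop performs (count-limited runs take ≤ count+1 iterations, unlimited ones ≤ 36^len+1)
def tpnFuel (length : Int) (count : Option Int) : Nat :=
  match count with
  | some c => if 0 < c then c.toNat + 1 else 36 ^ length.toNat + 1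
  | none => 36 ^ length.toNat + 1

def tpnLoop (length : Int) (count : Option Int) : Nat → List Char → Int → List String
  | 0, _, _ => []
  | fuel+1, cur, generated =>
    if (match count with | some c => decide (c ≠ 0 ∧ c ≤ generated) | none => false) then []
    else
      let y := String.ofList cur     -- ''.join(current)
      let p := tpnIncAux cur length.toNat
      if p.2 then [y] else y :: tpnLoop length count fuel p.1 (generated + 1)

def generate_sequential_tpns (length : Int) (start_tpn : Option String) (count : Option Int) : List String :=
  match start_tpn with
  | some s =>
    if s = "" then tpnLoop length count (tpnFuel length count) (List.replicate length.toNat '0') 0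
    else
      let current := (PySem.Str.upper s).toList
      if current.all (tpnChars.contains ·) then
        tpnLoop length count (tpnFuel length count) current 0
      else []   -- Python raises ValueError here; excluded by Pre_
  | none => tpnLoop length count (tpnFuel length count) (List.replicate length.toNat '0') 0

-- ===== PORT B =====

-- `for _ in range(width): m, r = divmod(m, 36); digits.append(chars[r])` then reversed(digits)
def tpnEncodeGo : Nat → Int → List Char → List Char
  | 0, _, digits => digits.reverse
  | w+1, m, digits =>
    tpnEncodeGo w (PySem.Int.floordiv m 36) (digits ++ [PySem.List.pyGetD tpnChars (PySem.Int.mod m 36) 'A'])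
    -- divmod(m, 36): divisor is the constant 36 ≠ 0, so floordiv/mod are exact

-- fuel for Source B's `while True`; at least the number of iterations it performs
def tpnAltFuel (width : Nat) (count : Option Int) : Nat :=
  match count with
  | some c => if 0 < c then c.toNat + 1 else 36 ^ width + 1
  | none => 36 ^ width + 1

-- Source B's main loop: counter n, `if n >= max_val: break` then `n += 1`
def tpnAltLoop (width : Nat) (count : Option Int) : Nat → Int → Int → List String
  | 0, _, _ => []
  | fuel+1, n, generated =>
    if (match count with | some c => decide (c ≠ 0 ∧ c ≤ generated) | none => false) then []
    else
      let y := String.ofList (tpnEncodeGo width n [])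
      if (36:Int) ^ width - 1 ≤ n then [y]
      else y :: tpnAltLoop width count fuel (n + 1) (generated + 1)

-- body of Source B after `s` is fixed: decode s into n, then count
def tpnAltBody (count : Option Int) (sL : List Char) : List String :=
  let n : Int := sL.foldl
      (fun n c => n * 36 + (((PySem.List.index? tpnChars c).getD 0 : Nat) : Int)) 0
  tpnAltLoop sL.length count (tpnAltFuel sL.length count) n 0

def generate_sequential_tpns_alt (length : Int) (start_tpn : Option String) (count : Option Int) : List String :=
  match start_tpn with
  | some s =>
    if s = "" then tpnAltBody count (List.replicate length.toNat '0')
    else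
      let sL := (PySem.Str.upper s).toList
      if sL.all (tpnChars.contains ·) then tpnAltBody count sL
      else []   -- raise ValueError, as in Source B; excluded by Pre_
  | none => tpnAltBody count (List.replicate length.toNat '0')

-- ===== PRECONDITION & SPEC =====

-- Pre_ excludes: start TPNs with characters outside A-Z0-9 (A raises ValueError), and start
-- TPNs whose length differs from `length` unless count < 0 (an inconsistent argument pair:
-- A raises IndexError on current[length-1] when shorter, and when longer its increment loop
-- touches only indices 0..length-1 and drags the rest along as an accidental frozen suffix,
-- while B counts over the whole start string; with count < 0 both return [] before that).
def Pre_generate_sequential_tpns (length : Int) (start_tpn : Option String) (count : Option Int) : Prop :=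
  match start_tpn with
  | some s => s ≠ "" →
      (((PySem.Str.upper s).toList.all (fun c => tpnChars.contains c)) = true ∧
       (((PySem.Str.upper s).toList.length : Int) = length ∨ count.getD 0 < 0))
  | none => True

instance (length : Int) (start_tpn : Option String) (count : Option Int) : Decidable (Pre_generate_sequential_tpns length start_tpn count) := by
  unfold Pre_generate_sequential_tpns; cases start_tpn <;> infer_instance

def pvWitness_generate_sequential_tpns : Int × Option String × Option Int := (2, none, some 3)

def Spec_generate_sequential_tpns (length : Int) (start_tpn : Option String) (count : Option Int) (out : List String) : Prop := out = generate_sequential_tpns_alt length start_tpn count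
instance (length : Int) (start_tpn : Option String) (count : Option Int) (out : List String) : Decidable (Spec_generate_sequential_tpns length start_tpn count out) := by unfold Spec_generate_sequential_tpns; infer_instance

-- ===== CLAIM (what is proved, stated in full; the proofs are below) =====
def Claim_equal_generate_sequential_tpns : Prop := ∀ (length : Int) (start_tpn : Option String) (count : Option Int), Dom_generate_sequential_tpns length start_tpn count → Pre_generate_sequential_tpns length start_tpn count → Spec_generate_sequential_tpns length start_tpn count (generate_sequential_tpns length start_tpn count)
-- ===== LEMMAS AND PROOFS =====

-- specification-level base-36 encoding, most-significant digit first
def tpnEnc : Nat → Nat → List Char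
  | 0, _ => []
  | w+1, n => tpnEnc w (n / 36) ++ [tpnChars.getD (n % 36) 'A']

def tpnDec (ds : List Char) : Nat :=
  ds.foldl (fun n c => n * 36 + (PySem.List.index? tpnChars c).getD 0) 0

lemma tpnEnc_length (w n : Nat) : (tpnEnc w n).length = w := by
  induction w generalizing n with
  | zero => rfl
  | succ w ih => simp [tpnEnc, ih]

lemma tpnChars_idx (c : Char) (hc : c ∈ tpnChars) :
    (PySem.List.index? tpnChars c).getD 0 < 36 ∧
    tpnChars.getD ((PySem.List.index? tpnChars c).getD 0) 'A' = c := by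
  fin_cases hc <;> decide

lemma tpnChars_getD_idx (k : Nat) (hk : k < 36) :
    PySem.List.index? tpnChars (tpnChars.getD k 'A') = some k := by
  interval_cases k <;> decide

lemma tpnSet_append_len (e t : List Char) (x : Char) : (e ++ t).set e.length x = e ++ t.set 0 x := by
  induction e with
  | nil => rfl
  | cons a e ih => simp [ih]

lemma tpnIncAux_enc (w : Nat) : ∀ (n : Nat) (suffix : List Char), n < 36 ^ w →
    tpnIncAux (tpnEnc w n ++ suffix) w =
      if n + 1 < 36 ^ w then (tpnEnc w (n+1) ++ suffix, false)
      else (tpnEnc w 0 ++ suffix, true) := by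
  induction w with
  | zero =>
    intro n suffix hn
    have hn0 : n = 0 := by simpa using hn
    subst hn0
    simp [tpnIncAux, tpnEnc]
  | succ w ih =>
    intro n suffix hn
    set e := tpnEnc w (n / 36) with he
    have hlen : e.length = w := tpnEnc_length w _
    have hmod : n % 36 < 36 := Nat.mod_lt _ (by omega)
    have hidx := tpnChars_getD_idx (n % 36) hmod
    have hcur : tpnEnc (w+1) n ++ suffix
        = e ++ (tpnChars.getD (n % 36) 'A') :: suffix := by
      simp [tpnEnc, he]
    rw [hcur]
    have hget : PySem.List.pyGet? (e ++ (tpnChars.getD (n % 36) 'A') :: suffix) ((w : Nat) : Int)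
        = some (tpnChars.getD (n % 36) 'A') := by
      rw [← hlen]
      exact_mod_cast PySem.List.pyGet?_append_length _ _ _
    have hdvd : (36:ℕ) ∣ 36^(w+1) := dvd_pow_self 36 (Nat.succ_ne_zero w)
    have hp : 36^(w+1) = 36^w * 36 := pow_succ 36 w
    have hsetgen : ∀ (x : Char), (e ++ (tpnChars.getD (n % 36) 'A') :: suffix).set w x
        = e ++ x :: suffix := by
      intro x
      rw [← hlen, tpnSet_append_len]
      rfl
    simp only [tpnIncAux, hget, hidx]
    by_cases h35 : n % 36 < 35
    · rw [if_pos h35]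
      have hlt : n + 1 < 36^(w+1) := by omega
      rw [if_pos hlt, hsetgen]
      have h1 : (n+1)/36 = n/36 := by omega
      have h2 : (n+1)%36 = n%36 + 1 := by omega
      simp [tpnEnc, h1, h2, he]
    · have h35' : n % 36 = 35 := by omega
      rw [if_neg h35, hsetgen]
      have hd : n/36 < 36^w := by omega
      rw [he, ih (n/36) ('A'::suffix) hd]
      by_cases hc : n/36 + 1 < 36^w
      · rw [if_pos hc, if_pos (by omega : n+1 < 36^(w+1))]
        have e1 : (n+1)/36 = n/36 + 1 := by omega
        have e2 : (n+1)%36 = 0 := by omega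
        simp [tpnEnc, e1, e2, tpnChars]
      · rw [if_neg hc, if_neg (by omega : ¬ (n+1 < 36^(w+1)))]
        simp [tpnEnc, tpnChars]

lemma tpnDec_lt_enc (ds : List Char) (h : ∀ c ∈ ds, c ∈ tpnChars) :
    tpnDec ds < 36 ^ ds.length ∧ tpnEnc ds.length (tpnDec ds) = ds := by
  induction ds using List.reverseRecOn with
  | nil => exact ⟨by simp [tpnDec], by simp [tpnDec, tpnEnc]⟩
  | append_singleton ds d ih =>
    have hds : ∀ c ∈ ds, c ∈ tpnChars := fun c hc => h c (List.mem_append_left _ hc)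
    have hd : d ∈ tpnChars := h d (by simp)
    obtain ⟨ihlt, ihenc⟩ := ih hds
    obtain ⟨hklt, hkget⟩ := tpnChars_idx d hd
    have hfold : tpnDec (ds ++ [d]) = tpnDec ds * 36 + (PySem.List.index? tpnChars d).getD 0 := by
      simp only [tpnDec, List.foldl_append, List.foldl_cons, List.foldl_nil]
    have hlen : (ds ++ [d]).length = ds.length + 1 := by simp
    constructor
    · rw [hfold, hlen, pow_succ]
      omega
    · rw [hfold, hlen]
      have e1 : (tpnDec ds * 36 + (PySem.List.index? tpnChars d).getD 0)/36 = tpnDec ds := by omega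
      have e2 : (tpnDec ds * 36 + (PySem.List.index? tpnChars d).getD 0)%36
          = (PySem.List.index? tpnChars d).getD 0 := by omega
      simp only [tpnEnc]
      rw [e1, e2, ihenc, hkget]

lemma tpnDec_int (ds : List Char) : ∀ a : Nat,
    ds.foldl (fun n c => n * 36 + (((PySem.List.index? tpnChars c).getD 0 : Nat) : Int)) (a : Int)
      = ((ds.foldl (fun n c => n * 36 + (PySem.List.index? tpnChars c).getD 0) a : Nat) : Int) := by
  induction ds with
  | nil => intro a; rfl
  | cons d ds ih =>
    intro a
    have : ((a : Int) * 36 + (((PySem.List.index? tpnChars d).getD 0 : Nat) : Int))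
        = ((a * 36 + (PySem.List.index? tpnChars d).getD 0 : Nat) : Int) := by push_cast; ring
    simpa [List.foldl_cons, this] using ih (a * 36 + (PySem.List.index? tpnChars d).getD 0)

lemma tpnEncodeGo_eq (w : Nat) : ∀ (n : Nat) (ds : List Char),
    tpnEncodeGo w ((n : Nat) : Int) ds = tpnEnc w n ++ ds.reverse := by
  induction w with
  | zero => intro n ds; simp [tpnEncodeGo, tpnEnc]
  | succ w ih =>
    intro n ds
    have h1 : PySem.Int.floordiv ((n : Nat) : Int) 36 = ((n / 36 : Nat) : Int) := by
      exact_mod_cast PySem.Int.floordiv_natCast n 36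
    have h2 : PySem.Int.mod ((n : Nat) : Int) 36 = ((n % 36 : Nat) : Int) := by
      exact_mod_cast PySem.Int.mod_natCast n 36
    simp only [tpnEncodeGo, h1, h2, PySem.List.pyGetD_natCast, ih, tpnEnc, List.getD]
    simp

-- number of strings still to be produced from state (value n, generated g)
def tpnSteps (w : Nat) (count : Option Int) (n : Nat) (g : Int) : Nat :=
  match count with
  | some c => if c ≠ 0 then min (36 ^ w - n) (c - g).toNat else 36 ^ w - n
  | none => 36 ^ w - n

lemma tpnLoop_eq (length : Int) (count : Option Int) :
    ∀ (fuel : Nat) (n : Nat) (g : Int) (suffix : List Char),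
      n < 36 ^ length.toNat → tpnSteps length.toNat count n g < fuel →
      tpnLoop length count fuel (tpnEnc length.toNat n ++ suffix) g
        = (List.range (tpnSteps length.toNat count n g)).map
            (fun k => String.ofList (tpnEnc length.toNat (n + k) ++ suffix)) := by
  intro fuel
  induction fuel with
  | zero => intro n g suffix _ hf; exact absurd hf (by omega)
  | succ f ihf =>
    intro n g suffix hn hf
    have hinc := tpnIncAux_enc length.toNat n suffix hn
    cases count with
    | none =>
      by_cases hlt : n + 1 < 36 ^ length.toNat
      · rw [if_pos hlt] at hinc
        have hstep : tpnSteps length.toNat none n g = tpnSteps length.toNat none (n+1) (g+1) + 1 := by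
          simp only [tpnSteps]; omega
        simp only [tpnLoop, hinc, Bool.false_eq_true, if_false]
        rw [ihf (n+1) (g+1) suffix hlt (by omega), hstep, List.range_succ_eq_map]
        simp only [List.map_cons, List.map_map, Function.comp_def, Nat.add_zero,
          Nat.succ_eq_add_one]
        congr 1
        apply List.map_congr_left
        intro k _
        have : n + (k + 1) = n + 1 + k := by omega
        rw [this]
      · rw [if_neg hlt] at hinc
        simp only [tpnLoop, hinc, Bool.false_eq_true, if_false]
        have hone : tpnSteps length.toNat none n g = 1 := by simp only [tpnSteps]; omega
        rw [hone]
        simp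
    | some c =>
      by_cases hstop : c ≠ 0 ∧ c ≤ g
      · have hz : tpnSteps length.toNat (some c) n g = 0 := by
          simp only [tpnSteps, if_pos hstop.1]; omega
        simp [tpnLoop, hstop, hz]
      · by_cases hlt : n + 1 < 36 ^ length.toNat
        · rw [if_pos hlt] at hinc
          have hstep : tpnSteps length.toNat (some c) n g
              = tpnSteps length.toNat (some c) (n+1) (g+1) + 1 := by
            simp only [tpnSteps]
            by_cases hc0 : c = 0
            · simp only [hc0]; simp; omega
            · simp only [if_pos hc0]; omega
          have hcond : (decide (c ≠ 0 ∧ c ≤ g)) = false := decide_eq_false hstop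
          simp only [tpnLoop, hcond, Bool.false_eq_true, if_false, hinc]
          rw [ihf (n+1) (g+1) suffix hlt (by omega), hstep, List.range_succ_eq_map]
          simp only [List.map_cons, List.map_map, Function.comp_def, Nat.add_zero,
            Nat.succ_eq_add_one]
          congr 1
          apply List.map_congr_left
          intro k _
          have : n + (k + 1) = n + 1 + k := by omega
          rw [this]
        · rw [if_neg hlt] at hinc
          have hcond : (decide (c ≠ 0 ∧ c ≤ g)) = false := decide_eq_false hstop
          simp only [tpnLoop, hcond, Bool.false_eq_true, if_false, hinc]
          have hone : tpnSteps length.toNat (some c) n g = 1 := by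
            simp only [tpnSteps]
            by_cases hc0 : c = 0
            · simp only [hc0]; simp; omega
            · simp only [if_pos hc0]
              have : ¬ (c ≤ g) := fun hcg => hstop ⟨hc0, hcg⟩
              omega
          rw [hone]
          simp

lemma tpnPowCast (w : Nat) : ((36 ^ w : Nat) : Int) = (36:Int) ^ w := by push_cast; ring

lemma tpnAltLoop_eq (w : Nat) (count : Option Int) :
    ∀ (fuel : Nat) (n : Nat) (g : Int),
      n < 36 ^ w → tpnSteps w count n g < fuel →
      tpnAltLoop w count fuel ((n : Nat) : Int) g
        = (List.range (tpnSteps w count n g)).map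
            (fun k => String.ofList (tpnEnc w (n + k))) := by
  intro fuel
  induction fuel with
  | zero => intro n g _ hf; exact absurd hf (by omega)
  | succ f ihf =>
    intro n g hn hf
    have hy : tpnEncodeGo w ((n : Nat) : Int) [] = tpnEnc w n := by
      simpa using tpnEncodeGo_eq w n []
    cases count with
    | none =>
      by_cases hlt : n + 1 < 36 ^ w
      · have hcond : ¬ ((36:Int) ^ w - 1 ≤ ((n : Nat) : Int)) := by
          rw [← tpnPowCast]; omega
        have hstep : tpnSteps w none n g = tpnSteps w none (n+1) (g+1) + 1 := by
          simp only [tpnSteps]; omega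
        have hcast : ((n : Nat) : Int) + 1 = (((n+1 : Nat)) : Int) := by push_cast; ring
        simp only [tpnAltLoop, Bool.false_eq_true, if_false, hy, if_neg hcond, hcast]
        rw [ihf (n+1) (g+1) hlt (by omega), hstep, List.range_succ_eq_map]
        simp only [List.map_cons, List.map_map, Function.comp_def, Nat.add_zero]
        congr 1
        apply List.map_congr_left
        intro k _
        have : n + (k + 1) = n + 1 + k := by omega
        rw [this]
      · have hcond : (36:Int) ^ w - 1 ≤ ((n : Nat) : Int) := by
          rw [← tpnPowCast]; omega
        have hone : tpnSteps w none n g = 1 := by simp only [tpnSteps]; omega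
        simp only [tpnAltLoop, Bool.false_eq_true, if_false, hy, if_pos hcond, hone]
        simp
    | some c =>
      by_cases hstop : c ≠ 0 ∧ c ≤ g
      · have hz : tpnSteps w (some c) n g = 0 := by
          simp only [tpnSteps, if_pos hstop.1]; omega
        simp [tpnAltLoop, hstop, hz]
      · have hcond0 : (decide (c ≠ 0 ∧ c ≤ g)) = false := decide_eq_false hstop
        by_cases hlt : n + 1 < 36 ^ w
        · have hcond : ¬ ((36:Int) ^ w - 1 ≤ ((n : Nat) : Int)) := by
            rw [← tpnPowCast]; omega
          have hstep : tpnSteps w (some c) n g = tpnSteps w (some c) (n+1) (g+1) + 1 := by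
            simp only [tpnSteps]
            by_cases hc0 : c = 0
            · simp only [hc0]; simp; omega
            · simp only [if_pos hc0]; omega
          have hcast : ((n : Nat) : Int) + 1 = (((n+1 : Nat)) : Int) := by push_cast; ring
          simp only [tpnAltLoop, hcond0, Bool.false_eq_true, if_false, hy, if_neg hcond, hcast]
          rw [ihf (n+1) (g+1) hlt (by omega), hstep, List.range_succ_eq_map]
          simp only [List.map_cons, List.map_map, Function.comp_def, Nat.add_zero]
          congr 1
          apply List.map_congr_left
          intro k _
          have : n + (k + 1) = n + 1 + k := by omega
          rw [this]
        · have hcond : (36:Int) ^ w - 1 ≤ ((n : Nat) : Int) := by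
            rw [← tpnPowCast]; omega
          have hone : tpnSteps w (some c) n g = 1 := by
            simp only [tpnSteps]
            by_cases hc0 : c = 0
            · simp only [hc0]; simp; omega
            · simp only [if_pos hc0]
              have : ¬ (c ≤ g) := fun hcg => hstop ⟨hc0, hcg⟩
              omega
          simp only [tpnAltLoop, hcond0, Bool.false_eq_true, if_false, hy, if_pos hcond, hone]
          simp

lemma tpnSteps_lt_fuel (w : Nat) (count : Option Int) (n : Nat) (hn : n < 36 ^ w) :
    tpnSteps w count n 0 < tpnAltFuel w count := by
  cases count with
  | none => simp only [tpnSteps, tpnAltFuel]; omega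
  | some c =>
    simp only [tpnSteps, tpnAltFuel]
    by_cases h0c : 0 < c
    · simp only [if_pos h0c, if_pos (show c ≠ 0 from by omega)]; omega
    · simp only [if_neg h0c]
      by_cases hc0 : c = 0
      · simp [hc0]
      · simp only [if_pos hc0]; omega

lemma tpnAltMain (count : Option Int) (sL : List Char)
    (hval : ∀ c ∈ sL, c ∈ tpnChars) :
    tpnAltBody count sL
      = (List.range (tpnSteps sL.length count (tpnDec sL) 0)).map
          (fun k => String.ofList (tpnEnc sL.length (tpnDec sL + k))) := by
  obtain ⟨hlt, _⟩ := tpnDec_lt_enc sL hval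
  have hnInt : sL.foldl
      (fun n c => n * 36 + (((PySem.List.index? tpnChars c).getD 0 : Nat) : Int)) 0
      = ((tpnDec sL : Nat) : Int) := by
    simpa using tpnDec_int sL 0
  simp only [tpnAltBody, hnInt]
  exact tpnAltLoop_eq sL.length count _ (tpnDec sL) 0 hlt (tpnSteps_lt_fuel _ _ _ hlt)

lemma tpnAMain (length : Int) (count : Option Int) (sL : List Char)
    (hval : ∀ c ∈ sL, c ∈ tpnChars) (hlen : sL.length = length.toNat) :
    tpnLoop length count (tpnFuel length count) sL 0
      = (List.range (tpnSteps length.toNat count (tpnDec sL) 0)).map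
          (fun k => String.ofList (tpnEnc length.toNat (tpnDec sL + k))) := by
  obtain ⟨hlt0, henc⟩ := tpnDec_lt_enc sL hval
  rw [hlen] at hlt0 henc
  have hfuel : tpnFuel length count = tpnAltFuel length.toNat count := by
    cases count <;> simp [tpnFuel, tpnAltFuel]
  have hcur : sL = tpnEnc length.toNat (tpnDec sL) ++ [] := by
    rw [henc]; simp
  conv_lhs => rw [hcur]
  rw [hfuel, tpnLoop_eq length count _ _ 0 [] hlt0 (tpnSteps_lt_fuel _ _ _ hlt0)]
  simp

-- the two ports agree whenever the working string has exactly `length` characters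
lemma tpnEqualCase (length : Int) (count : Option Int) (sL : List Char)
    (hval : ∀ c ∈ sL, c ∈ tpnChars) (hlen : sL.length = length.toNat) :
    tpnLoop length count (tpnFuel length count) sL 0 = tpnAltBody count sL := by
  rw [tpnAMain length count sL hval hlen, tpnAltMain count sL hval, hlen]

lemma tpnLoop_stop (length : Int) (c : Int) (fuel : Nat) (cur : List Char) (g : Int)
    (h : c ≠ 0 ∧ c ≤ g) : tpnLoop length (some c) fuel cur g = [] := by
  cases fuel with
  | zero => rfl
  | succ f => simp [tpnLoop, h]

lemma tpnAltLoop_stop (w : Nat) (c : Int) (fuel : Nat) (n : Int) (g : Int)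
    (h : c ≠ 0 ∧ c ≤ g) : tpnAltLoop w (some c) fuel n g = [] := by
  cases fuel with
  | zero => rfl
  | succ f => simp [tpnAltLoop, h]

-- both ports return [] the moment count is negative
lemma tpnNegCase (length : Int) (c : Int) (sL : List Char) (hneg : c < 0) :
    tpnLoop length (some c) (tpnFuel length (some c)) sL 0 = []
      ∧ tpnAltBody (some c) sL = [] := by
  refine ⟨tpnLoop_stop _ _ _ _ _ ⟨by omega, by omega⟩, ?_⟩
  simp only [tpnAltBody]
  exact tpnAltLoop_stop _ _ _ _ _ ⟨by omega, by omega⟩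

-- ===== VERDICT (by name: the statement is the Claim_ definition above) =====
theorem generate_sequential_tpns_spec : Claim_equal_generate_sequential_tpns := by
  intro length start_tpn count _ hpre
  unfold Spec_generate_sequential_tpns
  unfold generate_sequential_tpns generate_sequential_tpns_alt
  have hrep : ∀ c ∈ List.replicate length.toNat '0', c ∈ tpnChars := by
    intro c hc; rcases List.eq_of_mem_replicate hc with rfl; decide
  have hreplen : (List.replicate length.toNat '0').length = length.toNat := by simp
  match start_tpn with
  | none => exact tpnEqualCase length count _ hrep hreplen
  | some s =>
    by_cases hs : s = ""
    · simp only [hs, if_true]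
      exact tpnEqualCase length count _ hrep hreplen
    · simp only [if_neg hs]
      unfold Pre_generate_sequential_tpns at hpre
      rcases hpre hs with ⟨hall, hlen⟩
      have hval : ∀ c ∈ (PySem.Str.upper s).toList, c ∈ tpnChars := by
        intro c hc
        have := List.all_eq_true.mp hall c hc
        simpa using this
      simp only [hall, if_pos]
      rcases hlen with hlen | hneg
      · -- the start TPN has exactly `length` characters
        exact tpnEqualCase length count _ hval (by omega)
      · -- negative count: both sides stop before touching the string
        cases count with
        | none => simp at hneg
        | some c =>
          simp only [Option.getD_some] at hneg
          obtain ⟨hA, hB⟩ := tpnNegCase length c _ hneg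
          rw [hA, hB]
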